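-- pv_equiv track=rewrite | github.com/docToolchain/aoc-2019 | day04/python/haro87/enterprise.py | valid_larger_group
-- ===== SOURCE A (Python) =====
-- import collections
--
-- def valid_larger_group(codes):
--     validcodes = []
--     for code in codes:
--         c=collections.Counter(code)
--         large = False
--         for count in c.values():
--             count = int(count)
--             if count == 2:
--                 large = True
--         if large:
--             validcodes.append(code)
--     return validcodes
-- ===== SOURCE B (Python) =====
-- def valid_larger_group(codes):
--     validcodes = []
--     for code in codes:
--         s = sorted(code)
--         keep = False
--         i = 0
--         n = len(s)
--         while i < n:
--             j = i + 1
--             while j < n and s[j] == s[i]: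
--                 j += 1
--             if j - i == 2:
--                 keep = True
--             i = j
--         if keep:
--             validcodes.append(code)
--     return validcodes
-- ===== Notes on version B (the rewrite author's own statement) =====
-- stated objective: alternative
-- what changed: Replaces Counter hash tallying with sort-and-scan: each code is sorted and a single pointer walk over adjacent equal runs keeps the code when some run has length exactly 2.
import Mathlib
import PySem

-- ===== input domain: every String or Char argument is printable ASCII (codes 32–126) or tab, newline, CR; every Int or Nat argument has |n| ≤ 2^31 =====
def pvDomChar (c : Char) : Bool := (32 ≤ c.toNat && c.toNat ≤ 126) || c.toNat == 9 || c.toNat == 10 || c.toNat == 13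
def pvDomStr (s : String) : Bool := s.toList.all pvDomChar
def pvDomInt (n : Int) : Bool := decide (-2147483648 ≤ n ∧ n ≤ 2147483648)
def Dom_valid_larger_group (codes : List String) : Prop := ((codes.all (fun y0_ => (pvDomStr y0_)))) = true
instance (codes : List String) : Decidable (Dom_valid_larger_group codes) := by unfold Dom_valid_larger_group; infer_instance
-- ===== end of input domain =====

-- B sorts each code and scans adjacent equal runs, keeping the code when some run has length exactly 2,
-- instead of A's Counter tally; objective: alternative (sort-and-scan vs hash counting).

-- ===== PORT A =====
def valid_larger_group (codes : List String) : List String :=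
  codes.foldl (fun validcodes code =>
    let c := PySem.Dict.counter code.toList
    let large := c.values.foldl (fun large count => if count == 2 then true else large) false
    if large then validcodes ++ [code] else validcodes) []

-- ===== PORT B =====
-- B's while loop over the sorted list: consume one run (head + takeWhile equal), record
-- keep when its length is exactly 2, continue on the rest (dropWhile).
def pvRunScan (keep : Bool) : List Char → Bool
  | [] => keep
  | c :: rest =>
    pvRunScan (keep || (rest.takeWhile (· == c)).length + 1 == 2) (rest.dropWhile (· == c))
  termination_by l => l.length
  decreasing_by
    exact Nat.lt_succ_of_le (List.length_dropWhile_le _ _)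

def valid_larger_group_alt (codes : List String) : List String :=
  codes.foldl (fun validcodes code =>
    if pvRunScan false (PySem.List.sorted code.toList (fun c => c) false)
    then validcodes ++ [code] else validcodes) []

-- ===== PRECONDITION & SPEC =====
def Spec_valid_larger_group (codes : List String) (out : List String) : Prop := out = valid_larger_group_alt codes
instance (codes : List String) (out : List String) : Decidable (Spec_valid_larger_group codes out) := by unfold Spec_valid_larger_group; infer_instance

-- ===== CLAIM (what is proved, stated in full; the proofs are below) =====
def Claim_equal_valid_larger_group : Prop := ∀ (codes : List String), Dom_valid_larger_group codes → Spec_valid_larger_group codes (valid_larger_group codes)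

-- ===== LEMMAS AND PROOFS =====

-- c does not survive dropWhile (== c) on a sorted list all of whose elements are ≥ c
theorem pv_not_mem_drop (c : Char) (rest : List Char)
    (hp : rest.Pairwise (· ≤ ·)) (hge : ∀ x ∈ rest, c ≤ x) :
    c ∉ rest.dropWhile (· == c) := by
  induction rest with
  | nil => simp
  | cons y rs ih =>
    rcases List.pairwise_cons.1 hp with ⟨hy_le, hrs⟩
    by_cases hy : (y == c) = true
    · rw [List.dropWhile_cons, if_pos hy]
      exact ih hrs (fun x hx => hge x (List.mem_cons_of_mem _ hx))
    · rw [List.dropWhile_cons, if_neg hy]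
      intro hc
      rcases List.mem_cons.1 hc with h | h
      · exact hy (by simp [h])
      · have h1 : y ≤ c := hy_le c h
        have h2 : c ≤ y := hge y (List.mem_cons_self ..)
        exact hy (by simp [le_antisymm h1 h2])

-- On a (≤-)sorted list, the run scan reports whether some character occurs exactly twice.
theorem pvRunScan_sorted (l : List Char) (hs : l.Pairwise (· ≤ ·)) (keep : Bool) :
    pvRunScan keep l = (keep || l.any (fun ch => l.count ch == 2)) := by
  induction keep, l using pvRunScan.induct with
  | case1 keep => simp [pvRunScan]
  | case2 keep c rest ih =>
    rcases List.pairwise_cons.1 hs with ⟨hge, hrest⟩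
    set t := rest.takeWhile (· == c) with ht
    set d := rest.dropWhile (· == c) with hd
    have hsplit : rest = t ++ d := (List.takeWhile_append_dropWhile).symm
    have hmt : ∀ x ∈ t, x = c := by
      intro x hx
      have := List.mem_takeWhile_imp hx
      simpa using this
    have hcd : c ∉ d := pv_not_mem_drop c rest hrest hge
    have hdlt : ∀ x ∈ d, c < x := by
      intro x hx
      have hmem : x ∈ rest := by rw [hsplit]; exact List.mem_append_right _ hx
      exact lt_of_le_of_ne (hge x hmem) (fun h => hcd (h ▸ hx))
    have hd_pw : d.Pairwise (· ≤ ·) := by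
      have : d.Sublist rest := List.dropWhile_sublist _
      exact hrest.sublist this
    have htc : t.count c = t.length := List.count_eq_length.2 (fun b hb => (hmt b hb).symm ▸ rfl)
    have hdc : d.count c = 0 := List.count_eq_zero.2 hcd
    have hcount_c : (c :: rest).count c = t.length + 1 := by
      rw [hsplit, List.count_cons_self, List.count_append, htc, hdc]
    have hcount_d : ∀ x ∈ d, (c :: rest).count x = d.count x := by
      intro x hx
      have hxc : x ≠ c := (hdlt x hx).ne'
      have htx : t.count x = 0 := List.count_eq_zero.2 (fun hmem => hxc (hmt x hmem))
      rw [hsplit]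
      simp [List.count_append, htx, Ne.symm hxc]
    -- one unfolding step of the scan
    rw [pvRunScan, ih hd_pw]
    -- rewrite both anys
    have hany : (c :: rest).any (fun ch => (c :: rest).count ch == 2)
        = (((c :: rest).count c == 2) || d.any (fun ch => d.count ch == 2)) := by
      rw [Bool.eq_iff_iff]
      simp only [List.any_eq_true, Bool.or_eq_true, beq_iff_eq]
      constructor
      · rintro ⟨x, hx, hx2⟩
        rcases List.mem_cons.1 hx with h | h
        · exact Or.inl (h ▸ hx2)
        · rw [hsplit] at h
          rcases List.mem_append.1 h with h | h
          · exact Or.inl ((hmt x h) ▸ hx2)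
          · exact Or.inr ⟨x, h, (hcount_d x h).symm.trans hx2⟩
      · rintro (h | ⟨x, hx, hx2⟩)
        · exact ⟨c, List.mem_cons_self .., h⟩
        · refine ⟨x, ?_, (hcount_d x hx).trans hx2⟩
          rw [hsplit]; exact List.mem_cons_of_mem _ (List.mem_append_right _ hx)
    rw [hany, hcount_c]
    cases keep <;> simp

-- A's inner flag loop over Counter values is 'some char occurs exactly twice'.
theorem pv_flag_eq (l : List Char) :
    (PySem.Dict.counter l).values.foldl (fun large count => if count == 2 then true else large) false
      = l.any (fun ch => l.count ch == 2) := by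
  rw [PySem.List.foldl_if_true_eq]
  show ((PySem.Dict.counter l).items.map (·.2)).any (fun count => count == 2) = _
  rw [PySem.Dict.items_counter, List.map_map, List.any_map]
  rw [Bool.eq_iff_iff]
  simp only [List.any_eq_true, PySem.Set.mem_ofList, Function.comp, beq_iff_eq]
  constructor
  · rintro ⟨k, hk, h⟩; exact ⟨k, hk, by exact_mod_cast h⟩
  · rintro ⟨k, hk, h⟩; exact ⟨k, hk, by exact_mod_cast h⟩

-- B's sorted run scan equals the same predicate.
theorem pv_scan_eq (l : List Char) :
    pvRunScan false (PySem.List.sorted l (fun c => c) false) = l.any (fun ch => l.count ch == 2) := by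
  have hperm : (PySem.List.sorted l (fun c => c) false).Perm l := PySem.List.sorted_perm ..
  have hpw : (PySem.List.sorted l (fun c => c) false).Pairwise (· ≤ ·) :=
    PySem.List.sorted_pairwise ..
  rw [pvRunScan_sorted _ hpw, Bool.false_or, Bool.eq_iff_iff]
  simp only [List.any_eq_true, beq_iff_eq]
  constructor
  · rintro ⟨x, hx, h2⟩
    exact ⟨x, hperm.mem_iff.1 hx, (hperm.count_eq x).symm.trans h2⟩
  · rintro ⟨x, hx, h2⟩
    exact ⟨x, hperm.mem_iff.2 hx, (hperm.count_eq x).trans h2⟩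

-- ===== VERDICT (by name: the statement is the Claim_ definition above) =====
theorem valid_larger_group_spec : Claim_equal_valid_larger_group := by
  intro codes _
  unfold Spec_valid_larger_group valid_larger_group valid_larger_group_alt
  simp only [pv_flag_eq, pv_scan_eq]
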